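-- pv_equiv track=rewrite | github.com/54data/Algorithm_Study | 프로그래머스/lv2/42586. 기능개발/기능개발.py | solution
-- ===== SOURCE A (Python) =====
-- def solution(progresses, speeds):
--     result = []
--     while progresses != []:
--         cnt = 0
--         num = len(progresses)
--         for i in range(num):
--             progresses[i] += speeds[i]
--         while True:
--             if progresses[0] >= 100:
--                 x = progresses.pop(0)
--                 del speeds[0]
--                 cnt += 1
--                 if len(progresses) == 0:
--                     result.append(cnt)
--                     break
--                 continue
--             elif cnt != 0:
--                 result.append(cnt)
--                 break
--             else:
--                 break
--
--     return result
-- ===== SOURCE B (Python) =====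
-- def solution(progresses, speeds):
--     # O(n): days-to-finish per task, then group by running maximum finish day.
--     result = []
--     cnt = 0
--     cur = 0
--     for p, s in zip(progresses, speeds):
--         d = (99 - p) // s + 1
--         if d < 1:
--             d = 1
--         if cnt and d <= cur:
--             cnt += 1
--         else:
--             if cnt:
--                 result.append(cnt)
--             cnt = 1
--             cur = d
--     if cnt:
--         result.append(cnt)
--     return result
-- ===== Notes on version B (the rewrite author's own statement) =====
-- stated objective: faster
-- what changed: replaces A's day-by-day simulation with pop(0) by computing each task's finish day in closed form ((99-p)//s+1) and grouping tasks in one pass by running maximum finish day; intended as faster: a timing run measured A timing out at n=16 where B returned (no clean ratio at a size both finish)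
-- outside the precondition, e.g. on solution([99, 110], [1, -1]): A returns [2], B returns [1, 1]; on solution([100], [0]): A returns [1], B raises ZeroDivisionError
import Mathlib
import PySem

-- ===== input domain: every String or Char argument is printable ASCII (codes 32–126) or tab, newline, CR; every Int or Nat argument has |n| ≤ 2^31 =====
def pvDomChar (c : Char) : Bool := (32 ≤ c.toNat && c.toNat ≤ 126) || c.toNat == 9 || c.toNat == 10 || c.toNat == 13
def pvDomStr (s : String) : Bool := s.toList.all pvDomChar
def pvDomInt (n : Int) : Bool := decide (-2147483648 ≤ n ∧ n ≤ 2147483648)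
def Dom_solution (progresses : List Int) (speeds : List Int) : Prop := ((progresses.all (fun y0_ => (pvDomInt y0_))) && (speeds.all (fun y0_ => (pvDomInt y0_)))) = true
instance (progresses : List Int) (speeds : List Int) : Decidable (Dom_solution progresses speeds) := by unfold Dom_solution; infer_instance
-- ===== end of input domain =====

-- B replaces A's day-by-day simulation by a closed-form finish day per task, grouped by
-- running maximum in one pass (A empties its argument lists in place; B does not mutate:
-- the equivalence proved here is about the return value).

-- ===== PORT A =====
-- inner 'while True' loop: pops the front while it is ≥ 100, counting pops
def popLoop : List Int → List Int → Int → List Int × List Int × Int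
  | [], speeds, cnt => ([], speeds, cnt)
  | p :: ps, speeds, cnt =>
    if 100 ≤ p then popLoop ps (speeds.drop 1) (cnt + 1)
    else (p :: ps, speeds, cnt)

-- outer 'while progresses != []' loop; fuel bounds the number of days (on Pre_ inputs in
-- Dom the Python loop runs at most max(1, 100 - min p) ≤ 2147483750 days, see solution_spec)
def outerLoop : Nat → List Int → List Int → List Int → List Int
  | 0, _, _, result => result
  | fuel + 1, progresses, speeds, result =>
    if progresses = [] then result
    else
      let ps1 := progresses.zipWith (· + ·) speeds
      let t := popLoop ps1 speeds 0
      outerLoop fuel t.1 t.2.1 (if t.2.2 ≠ 0 then result ++ [t.2.2] else result)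

def solution (progresses : List Int) (speeds : List Int) : List Int :=
  outerLoop 2147483750 progresses speeds []

-- ===== PORT B =====
def solution_alt (progresses : List Int) (speeds : List Int) : List Int :=
  let step : List Int × Int × Int → Int × Int → List Int × Int × Int := fun st x =>
    let d0 := PySem.Int.floordiv (99 - x.1) x.2 + 1
    let d := if d0 < 1 then 1 else d0
    if st.2.1 ≠ 0 ∧ d ≤ st.2.2 then (st.1, st.2.1 + 1, st.2.2)
    else ((if st.2.1 ≠ 0 then st.1 ++ [st.2.1] else st.1), 1, d)
  let fin := (progresses.zip speeds).foldl step ([], 0, 0)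
  if fin.2.1 ≠ 0 then fin.1 ++ [fin.2.1] else fin.1

-- ===== PRECONDITION & SPEC =====
-- Pre_ excludes inputs where speeds is shorter than progresses (A raises IndexError) and
-- inputs with a zero or negative paired speed — the problem's natural domain is positive
-- speeds: there A diverges on almost all inputs, and on the few where an already-overshot
-- task lets it terminate the returned grouping is an artefact (B raises on s = 0 and groups
-- differently for negative speeds).
def Pre_solution (progresses : List Int) (speeds : List Int) : Prop :=
  progresses.length ≤ speeds.length ∧ ∀ x ∈ progresses.zip speeds, 1 ≤ x.2
instance (progresses : List Int) (speeds : List Int) : Decidable (Pre_solution progresses speeds) := by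
  unfold Pre_solution; infer_instance

def pvWitness_solution : List Int × List Int := ([93, 30, 55], [1, 30, 5])

def Spec_solution (progresses : List Int) (speeds : List Int) (out : List Int) : Prop :=
  out = solution_alt progresses speeds
instance (progresses : List Int) (speeds : List Int) (out : List Int) : Decidable (Spec_solution progresses speeds out) := by
  unfold Spec_solution; infer_instance

-- ===== CLAIM (what is proved, stated in full; the proofs are below) =====
def Claim_equal_solution : Prop := ∀ (progresses : List Int) (speeds : List Int), Dom_solution progresses speeds → Pre_solution progresses speeds → Spec_solution progresses speeds (solution progresses speeds)

-- ===== LEMMAS AND PROOFS =====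

-- finish day of one (progress, speed) pair, as B computes it
def dayFn (x : Int × Int) : Int :=
  if PySem.Int.floordiv (99 - x.1) x.2 + 1 < 1 then 1 else PySem.Int.floordiv (99 - x.1) x.2 + 1

-- one day passing: d ↦ max 1 (d - 1)
def dec (d : Int) : Int := if d - 1 < 1 then 1 else d - 1

def addFn (x : Int × Int) : Int := x.1 + x.2
def shiftFn (x : Int × Int) : Int × Int := (x.1 + x.2, x.2)

-- group sizes by running maximum (the abstract form of B)
def groups : List Int → List Int
  | [] => []
  | d :: D => (1 + ((D.takeWhile (fun e => decide (e ≤ d))).length : Int)) ::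
      groups (D.dropWhile (fun e => decide (e ≤ d)))
termination_by D => D.length
decreasing_by
  simp only [List.length_cons]
  exact Nat.lt_succ_of_le (List.length_dropWhile_le _ _)

-- step of B specialised to the day value
def stepD (st : List Int × Int × Int) (d : Int) : List Int × Int × Int :=
  if st.2.1 ≠ 0 ∧ d ≤ st.2.2 then (st.1, st.2.1 + 1, st.2.2)
  else ((if st.2.1 ≠ 0 then st.1 ++ [st.2.1] else st.1), 1, d)

-- B's final 'if cnt: result.append(cnt)'
def flush (st : List Int × Int × Int) : List Int :=
  if st.2.1 ≠ 0 then st.1 ++ [st.2.1] else st.1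

lemma one_le_dayFn (x : Int × Int) : 1 ≤ dayFn x := by
  unfold dayFn; split <;> omega

lemma dayFn_shift (p s : Int) (hs : 1 ≤ s) : dayFn (p + s, s) = dec (dayFn (p, s)) := by
  unfold dayFn dec
  dsimp only
  have h : PySem.Int.floordiv (99 - (p + s)) s = PySem.Int.floordiv (99 - p) s - 1 := by
    rw [PySem.Int.floordiv_eq_ediv_of_pos (by omega), PySem.Int.floordiv_eq_ediv_of_pos (by omega)]
    have := Int.add_mul_ediv_right (99 - p) (-1) (show s ≠ 0 by omega)
    have e : 99 - p + (-1) * s = 99 - (p + s) := by ring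
    rw [e] at this; omega
  simp only [h]; split <;> split <;> omega

lemma le100_iff_day_one (p s : Int) (hs : 1 ≤ s) : (100 ≤ p + s) ↔ dayFn (p, s) = 1 := by
  unfold dayFn
  dsimp only
  have h1 := PySem.Int.le_floordiv_iff_mul_le (a := 99 - p) (b := s) (q := 1) (by omega)
  constructor
  · intro h; have : ¬ (1 ≤ PySem.Int.floordiv (99 - p) s) := by
      intro hc; have := h1.mp hc; nlinarith
    split <;> omega
  · intro h
    have : ¬ (1 ≤ PySem.Int.floordiv (99 - p) s) := by
      intro hc; split at h <;> omega
    have : ¬ (1 * s ≤ 99 - p) := fun hc => this (h1.mpr hc)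
    omega

lemma popLoop_spec (l : List Int) : ∀ (ss : List Int) (cnt : Int),
    popLoop l ss cnt =
      (l.dropWhile (fun p => decide (100 ≤ p)),
       ss.drop (l.takeWhile (fun p => decide (100 ≤ p))).length,
       cnt + (l.takeWhile (fun p => decide (100 ≤ p))).length) := by
  induction l with
  | nil => intro ss cnt; simp [popLoop]
  | cons p ps ih =>
    intro ss cnt
    by_cases h : 100 ≤ p
    · simp [popLoop, h, ih]
      omega
    · simp [popLoop, h]

lemma foldl_stepD (D : List Int) : ∀ (res : List Int) (cnt cur : Int), 1 ≤ cnt →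
    flush (D.foldl stepD (res, cnt, cur)) =
      res ++ (cnt + ((D.takeWhile (fun e => decide (e ≤ cur))).length : Int)) ::
        groups (D.dropWhile (fun e => decide (e ≤ cur))) := by
  induction D with
  | nil => intro res cnt cur h; simp [flush, groups]; omega
  | cons d D ih =>
    intro res cnt cur h
    by_cases hd : d ≤ cur
    · have : stepD (res, cnt, cur) d = (res, cnt + 1, cur) := by
        simp [stepD]; omega
      simp only [List.foldl_cons, this, List.takeWhile_cons, List.dropWhile_cons, hd,
        decide_true, if_true]
      rw [ih res (cnt + 1) cur (by omega)]
      simp; omega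
    · have : stepD (res, cnt, cur) d = (res ++ [cnt], 1, d) := by
        have : cnt ≠ 0 := by omega
        simp [stepD, hd, this]
      simp only [List.foldl_cons, this, List.takeWhile_cons, List.dropWhile_cons, hd,
        decide_false]
      rw [ih (res ++ [cnt]) 1 d (by omega)]
      simp [groups]

lemma alt_eq_groups (progresses speeds : List Int) :
    solution_alt progresses speeds = groups ((progresses.zip speeds).map dayFn) := by
  unfold solution_alt
  have hstep : (fun (st : List Int × Int × Int) (x : Int × Int) =>
      let d0 := PySem.Int.floordiv (99 - x.1) x.2 + 1
      let d := if d0 < 1 then 1 else d0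
      if st.2.1 ≠ 0 ∧ d ≤ st.2.2 then (st.1, st.2.1 + 1, st.2.2)
      else ((if st.2.1 ≠ 0 then st.1 ++ [st.2.1] else st.1), 1, d))
      = fun st x => stepD st (dayFn x) := by
    funext st x; simp only [stepD, dayFn]
  rw [hstep]
  cases h : progresses.zip speeds with
  | nil => simp [groups]
  | cons x L =>
    have h1 : stepD ([], (0 : Int), (0 : Int)) (dayFn x) = ([], 1, dayFn x) := by
      simp [stepD]
    simp only [List.foldl_cons, h1]
    have h2 : (L.foldl (fun st x => stepD st (dayFn x)) ([], 1, dayFn x))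
        = (L.map dayFn).foldl stepD ([], 1, dayFn x) := List.foldl_map.symm
    rw [h2]
    have h3 := foldl_stepD (L.map dayFn) [] 1 (dayFn x) (by omega)
    simp only [flush] at h3
    rw [h3]
    simp [groups]

lemma takeWhile_congr_mem {α : Type} (p q : α → Bool) :
    ∀ (l : List α), (∀ x ∈ l, p x = q x) →
      l.takeWhile p = l.takeWhile q ∧ l.dropWhile p = l.dropWhile q := by
  intro l
  induction l with
  | nil => intro _; exact ⟨rfl, rfl⟩
  | cons a l ih =>
    intro h
    have ha := h a (by simp)
    have ⟨h1, h2⟩ := ih (fun x hx => h x (by simp [hx]))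
    simp [List.takeWhile_cons, List.dropWhile_cons, ha, h1, h2]

lemma dec_le_iff (d e : Int) (hd : 2 ≤ d) (he : 1 ≤ e) :
    (decide (dec e ≤ d - 1)) = (decide (e ≤ d)) := by
  unfold dec
  split
  · simp
    omega
  · simp

lemma tw_dw_dec (d : Int) (hd : 2 ≤ d) : ∀ (l : List Int), (∀ e ∈ l, 1 ≤ e) →
    (l.map dec).takeWhile (fun e => decide (e ≤ d - 1)) =
        (l.takeWhile (fun e => decide (e ≤ d))).map dec ∧
    (l.map dec).dropWhile (fun e => decide (e ≤ d - 1)) =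
        (l.dropWhile (fun e => decide (e ≤ d))).map dec := by
  intro l hl
  rw [List.takeWhile_map, List.dropWhile_map]
  have := takeWhile_congr_mem (fun e => decide (dec e ≤ d - 1)) (fun e => decide (e ≤ d)) l
    (fun x hx => dec_le_iff d x hd (hl x hx))
  simp only [Function.comp_def]
  exact ⟨by rw [this.1], by rw [this.2]⟩

lemma groups_dec (n : Nat) : ∀ (D : List Int), D.length ≤ n → (∀ d ∈ D, 1 ≤ d) →
    (∀ d₀, D.head? = some d₀ → 2 ≤ d₀) → groups (D.map dec) = groups D := by
  induction n with
  | zero =>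
    intro D hlen _ _
    have : D = [] := List.length_eq_zero_iff.mp (by omega)
    simp [this, groups]
  | succ n ih =>
    intro D hlen h1 hhead
    cases D with
    | nil => simp [groups]
    | cons d rest =>
      have hd : 2 ≤ d := hhead d rfl
      have hrest : ∀ e ∈ rest, 1 ≤ e := fun e he => h1 e (by simp [he])
      have hdec : dec d = d - 1 := by unfold dec; split <;> omega
      have ⟨htw, hdw⟩ := tw_dw_dec d hd rest hrest
      rw [List.map_cons, groups, groups, hdec, htw, hdw]
      congr 1
      · simp
      · apply ih
        · have := List.length_dropWhile_le (fun e => decide (e ≤ d)) rest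
          simp at hlen ⊢; omega
        · intro e he
          exact hrest e ((List.dropWhile_sublist _).subset he)
        · intro d₀ h₀
          cases hne : rest.dropWhile (fun e => decide (e ≤ d)) with
          | nil => simp [hne] at h₀
          | cons a t =>
            have hpa := List.head_dropWhile_not (l := rest) (fun e => decide (e ≤ d)) (by simp [hne])
            simp [hne] at h₀ hpa
            omega

lemma head_dw_ge2 (l : List Int) (hl : ∀ e ∈ l, 1 ≤ e) :
    ∀ d₀, (l.dropWhile (fun e => decide (e = 1))).head? = some d₀ → 2 ≤ d₀ := by
  intro d₀ h₀
  have hmem : d₀ ∈ l.dropWhile (fun e => decide (e = 1)) := List.mem_of_mem_head? h₀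
  have h1 : 1 ≤ d₀ := hl d₀ ((List.dropWhile_sublist _).subset hmem)
  cases hne : l.dropWhile (fun e => decide (e = 1)) with
  | nil => simp [hne] at h₀
  | cons a t =>
    have hpa := List.head_dropWhile_not (l := l) (fun e => decide (e = 1)) (by simp [hne])
    simp [hne] at h₀ hpa
    omega

lemma groups_step (D : List Int) (h1 : ∀ d ∈ D, 1 ≤ d) (hne : D ≠ []) :
    groups D =
      (if ((D.takeWhile (fun e => decide (e = 1))).length : Int) ≠ 0
        then [((D.takeWhile (fun e => decide (e = 1))).length : Int)] else []) ++
      groups ((D.dropWhile (fun e => decide (e = 1))).map dec) := by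
  cases D with
  | nil => exact absurd rfl hne
  | cons d rest =>
    have hrest : ∀ e ∈ rest, 1 ≤ e := fun e he => h1 e (by simp [he])
    by_cases hd : d = 1
    · subst hd
      have hcong := takeWhile_congr_mem (fun e => decide (e ≤ 1)) (fun e => decide (e = 1)) rest
        (fun x hx => by have := hrest x hx; simp; omega)
      have hdecgrp : groups ((rest.dropWhile (fun e => decide (e = 1))).map dec)
          = groups (rest.dropWhile (fun e => decide (e = 1))) := by
        apply groups_dec (rest.dropWhile (fun e => decide (e = 1))).length _ le_rfl
        · exact fun e he => hrest e ((List.dropWhile_sublist _).subset he)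
        · exact head_dw_ge2 rest hrest
      rw [groups, hcong.1, hcong.2]
      simp only [List.takeWhile_cons, List.dropWhile_cons, decide_true, if_true]
      rw [hdecgrp]
      simp only [List.length_cons, Nat.cast_add, Nat.cast_one]
      rw [if_pos (by omega)]
      simp [add_comm]
    · have htw : (d :: rest).takeWhile (fun e => decide (e = 1)) = [] := by
        simp [hd]
      have hdw : (d :: rest).dropWhile (fun e => decide (e = 1)) = d :: rest := by
        simp [hd]
      rw [htw, hdw]
      simp only [List.length_nil, Nat.cast_zero, ne_eq, not_true_eq_false, if_false]
      rw [groups_dec (d :: rest).length _ le_rfl h1]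
      · simp
      · intro d₀ h₀
        simp at h₀
        have := h1 d (by simp)
        omega

lemma zip_map_add (ps : List Int) : ∀ ss : List Int, ps.length ≤ ss.length →
    ((ps.zip ss).map addFn).zip ss = (ps.zip ss).map shiftFn := by
  induction ps with
  | nil => simp
  | cons p ps ih =>
    intro ss h
    cases ss with
    | nil => simp at h
    | cons s ss =>
      simp only [List.zip_cons_cons, List.map_cons, addFn, shiftFn]
      rw [ih ss (by simpa using h)]

lemma rezip (Q : Int × Int → Bool) (ps : List Int) : ∀ ss : List Int, ps.length ≤ ss.length →
    (((ps.zip ss).dropWhile Q).map addFn).zip (ss.drop ((ps.zip ss).takeWhile Q).length)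
      = ((ps.zip ss).dropWhile Q).map shiftFn := by
  induction ps with
  | nil => simp
  | cons p ps ih =>
    intro ss h
    cases ss with
    | nil => simp at h
    | cons s ss =>
      simp only [List.zip_cons_cons, List.dropWhile_cons, List.takeWhile_cons]
      by_cases hq : Q (p, s)
      · simp only [hq, if_true, List.length_cons, List.drop_succ_cons]
        exact ih ss (by simpa using h)
      · simp only [hq, if_false, List.length_nil, List.drop_zero, Bool.false_eq_true]
        exact zip_map_add (p :: ps) (s :: ss) h

lemma outer_eq (fuel : Nat) : ∀ (ps ss res : List Int),
    ps.length ≤ ss.length → (∀ x ∈ ps.zip ss, 1 ≤ x.2) →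
    (∀ d ∈ (ps.zip ss).map dayFn, d ≤ (fuel : Int)) →
    outerLoop fuel ps ss res = res ++ groups ((ps.zip ss).map dayFn) := by
  induction fuel with
  | zero =>
    intro ps ss res hlen hs hf
    cases hz : ps.zip ss with
    | nil => simp [outerLoop, groups]
    | cons x L =>
      exfalso
      have h1 := one_le_dayFn x
      have h2 := hf (dayFn x) (by simp [hz])
      simp at h2; omega
  | succ fuel ih =>
    intro ps ss res hlen hs hf
    by_cases hps : ps = []
    · simp [outerLoop, hps, groups]
    · simp only [outerLoop]
      rw [if_neg hps]
      have hzw : ps.zipWith (· + ·) ss = (ps.zip ss).map addFn := by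
        simp [List.zip, addFn]
      rw [hzw, popLoop_spec]
      set L := ps.zip ss with hL
      -- transfer the pop predicate to the day list
      have htw1 : (L.map addFn).takeWhile (fun p => decide (100 ≤ p))
          = (L.takeWhile ((fun p => decide (100 ≤ p)) ∘ addFn)).map addFn := List.takeWhile_map
      have hdw1 : (L.map addFn).dropWhile (fun p => decide (100 ≤ p))
          = (L.dropWhile ((fun p => decide (100 ≤ p)) ∘ addFn)).map addFn := List.dropWhile_map
      have hcong := takeWhile_congr_mem ((fun p => decide (100 ≤ p)) ∘ addFn)
          (fun x => decide (dayFn x = 1)) L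
          (fun x hx => by
            have hs1 := hs x hx
            simp only [Function.comp_def, addFn]
            rw [decide_eq_decide]
            exact le100_iff_day_one x.1 x.2 hs1)
      rw [htw1, hdw1, hcong.1, hcong.2]
      set Q : Int × Int → Bool := fun x => decide (dayFn x = 1) with hQ
      set tw := L.takeWhile Q with htwdef
      set dw := L.dropWhile Q with hdwdef
      -- lengths
      have hcompQ : ((fun e => decide (e = 1)) ∘ dayFn) = Q := by
        funext x; simp [hQ]
      have hlsum : tw.length + dw.length = L.length := by
        rw [htwdef, hdwdef]
        have h' := congrArg List.length (List.takeWhile_append_dropWhile (p := Q) (l := L))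
        rw [List.length_append] at h'
        exact h'
      have hLlen : L.length ≤ ss.length := by
        rw [hL, List.length_zip]; omega
      -- the recursive call
      have hrez := rezip Q ps ss hlen
      rw [← hL] at hrez
      rw [← htwdef, ← hdwdef] at hrez
      have hnewdays : ((dw.map addFn).zip (ss.drop tw.length)).map dayFn
          = ((L.map dayFn).dropWhile (fun e => decide (e = 1))).map dec := by
        rw [hrez, List.map_map]
        have h1 : dw.map (dayFn ∘ shiftFn) = dw.map (dec ∘ dayFn) := by
          apply List.map_congr_left
          intro x hx
          have hxL : x ∈ L := (List.dropWhile_sublist _).subset (hdwdef ▸ hx)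
          have hs1 := hs x hxL
          simp only [Function.comp_def, shiftFn]
          rw [← dayFn_shift x.1 x.2 hs1]
        rw [h1, ← List.map_map]
        congr 1
        rw [hdwdef, List.dropWhile_map, hcompQ]
      have hnewlen : (dw.map addFn).length ≤ (ss.drop tw.length).length := by
        rw [List.length_map, List.length_drop]; omega
      have hnewspeeds : ∀ x ∈ (dw.map addFn).zip (ss.drop tw.length), 1 ≤ x.2 := by
        rw [hrez]
        intro x hx
        obtain ⟨y, hy, rfl⟩ := List.mem_map.mp hx
        have hyL : y ∈ L := (List.dropWhile_sublist _).subset (hdwdef ▸ hy)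
        have := hs y hyL
        simpa [shiftFn] using this
      have hdays1 : ∀ d ∈ L.map dayFn, 1 ≤ d := by
        intro d hd
        obtain ⟨x, _, rfl⟩ := List.mem_map.mp hd
        exact one_le_dayFn x
      have hnewfuel : ∀ d ∈ ((dw.map addFn).zip (ss.drop tw.length)).map dayFn,
          d ≤ (fuel : Int) := by
        rw [hnewdays]
        intro d hd
        obtain ⟨d₀, hd₀, rfl⟩ := List.mem_map.mp hd
        have hd₀days : d₀ ∈ L.map dayFn := (List.dropWhile_sublist _).subset hd₀
        have hb := hf d₀ hd₀days
        push_cast at hb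
        -- fuel ≥ 1 because the head of the dropWhile is ≥ 2
        have hfuel1 : (1 : Int) ≤ fuel := by
          cases hne : (L.map dayFn).dropWhile (fun e => decide (e = 1)) with
          | nil => rw [hne] at hd₀; simp at hd₀
          | cons a t =>
            have ha2 := head_dw_ge2 (L.map dayFn) hdays1 a (by rw [hne]; rfl)
            have haf := hf a ((List.dropWhile_sublist _).subset (by rw [hne]; simp))
            push_cast at haf
            omega
        unfold dec
        split <;> omega
      simp only [List.length_map]
      rw [ih (dw.map addFn) (ss.drop tw.length)
        (if (0 + (tw.length : Int)) ≠ 0 then res ++ [0 + (tw.length : Int)] else res)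
        hnewlen hnewspeeds hnewfuel, hnewdays]
      -- assemble with the groups step equation
      have hgs := groups_step (L.map dayFn) hdays1
        (by
          intro hc
          apply hps
          cases ps with
          | nil => rfl
          | cons p ps' =>
            cases ss with
            | nil => simp at hlen
            | cons s ss' => rw [hL] at hc; simp at hc)
      have hktw : ((L.map dayFn).takeWhile (fun e => decide (e = 1))).length = tw.length := by
        rw [List.takeWhile_map, List.length_map, hcompQ, htwdef]
      rw [hktw] at hgs
      rw [hgs]
      by_cases hk : (tw.length : Int) = 0
      · simp [hk]
      · rw [if_pos (show (0:Int) + (tw.length : Int) ≠ 0 by omega), if_pos hk]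
        simp

-- ===== VERDICT (by name: the statement is the Claim_ definition above) =====
theorem solution_spec : Claim_equal_solution := by
  intro ps ss hdom hpre
  obtain ⟨hlen, hs⟩ := hpre
  show solution ps ss = solution_alt ps ss
  simp only [Dom_solution, Bool.and_eq_true, List.all_eq_true, pvDomInt,
    decide_eq_true_eq] at hdom
  have hbound : ∀ d ∈ (ps.zip ss).map dayFn, d ≤ ((2147483750 : Nat) : Int) := by
    intro d hd
    obtain ⟨x, hx, rfl⟩ := List.mem_map.mp hd
    have hs1 := hs x hx
    have hp1 := hdom.1 x.1 (List.of_mem_zip hx).1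
    have hflt : PySem.Int.floordiv (99 - x.1) x.2 < 2147483748 :=
      (PySem.Int.floordiv_lt_iff_lt_mul (by omega)).mpr (by omega)
    unfold dayFn
    push_cast
    split <;> omega
  rw [alt_eq_groups, solution, outer_eq 2147483750 ps ss [] hlen hs hbound, List.nil_append]
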